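-- pv_equiv track=rewrite | github.com/tmdtmd85/EulerProject | 31_60/49.py | gen_perm
-- ===== SOURCE A (Python) =====
-- def gen_perm(data):
--         nums = []
--         while data != 0:
--             nums.append(data % 10)
--             data = int(data/10)
--         nums.sort(reverse=True)
--
--         result = 0
--         for n in nums:
--             result = 10 * result + n
--
--         return result
-- ===== SOURCE B (Python) =====
-- def gen_perm(data):
--     # counting sort over the ten possible digit values instead of list + .sort
--     counts = {}
--     while data != 0:
--         d = data % 10
--         counts[d] = counts.get(d, 0) + 1
--         data = int(data / 10)
--     result = 0
--     for d in range(9, -1, -1):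
--         for _ in range(counts.get(d, 0)):
--             result = 10 * result + d
--     return result
-- ===== Notes on version B (the rewrite author's own statement) =====
-- stated objective: alternative
-- what changed: B replaces collecting digits into a list and calling .sort(reverse=True) by a counting sort: one pass builds a dict of digit frequencies, then one descending pass over the ten possible digit values rebuilds the result.
import Mathlib
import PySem

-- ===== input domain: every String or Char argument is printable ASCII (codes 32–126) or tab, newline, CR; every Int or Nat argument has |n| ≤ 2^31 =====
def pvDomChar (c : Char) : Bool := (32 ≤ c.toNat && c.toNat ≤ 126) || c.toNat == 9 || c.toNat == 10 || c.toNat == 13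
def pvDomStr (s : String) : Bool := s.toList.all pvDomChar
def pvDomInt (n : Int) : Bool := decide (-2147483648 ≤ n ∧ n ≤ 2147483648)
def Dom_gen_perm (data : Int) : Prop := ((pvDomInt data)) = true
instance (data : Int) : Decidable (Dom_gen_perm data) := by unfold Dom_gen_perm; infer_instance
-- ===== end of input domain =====

-- B replaces list + .sort(reverse=True) by a counting sort: a dict of digit frequencies,
-- rebuilt in one descending pass over the ten possible digit values (objective: alternative).

-- Python's `int(data/10)` (float division, then truncation) equals truncation toward zero,
-- i.e. Int.tdiv, for every |data| ≤ 2^31 (the stated domain); both ports use Int.tdiv.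
theorem tdiv_ten_natAbs_lt (data : Int) (h : data ≠ 0) :
    (data.tdiv 10).natAbs < data.natAbs := by
  rw [Int.natAbs_tdiv]
  exact Nat.div_lt_self (by omega) (by norm_num)

-- ===== PORT A =====
-- the while loop collecting nums = [data % 10, …]
def genPermDigitsA (data : Int) : List Int :=
  if data = 0 then []
  else (PySem.Int.mod data 10) :: genPermDigitsA (data.tdiv 10)
termination_by data.natAbs
decreasing_by exact tdiv_ten_natAbs_lt data (by assumption)

def gen_perm (data : Int) : Int :=
  let nums := PySem.List.sorted (genPermDigitsA data) (fun x => x) true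
  nums.foldl (fun result n => 10 * result + n) 0

-- ===== PORT B =====
-- the while loop maintaining the dict counts (counts[d] = counts.get(d, 0) + 1)
def genPermCountsB (data : Int) (counts : PySem.Dict Int Int) : PySem.Dict Int Int :=
  if data = 0 then counts
  else genPermCountsB (data.tdiv 10)
    (counts.insert (PySem.Int.mod data 10) (counts.getD (PySem.Int.mod data 10) 0 + 1))
termination_by data.natAbs
decreasing_by exact tdiv_ten_natAbs_lt data (by assumption)

def gen_perm_alt (data : Int) : Int :=
  let counts := genPermCountsB data PySem.Dict.empty
  (PySem.List.pyRange 9 (-1) (-1)).foldl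
    (fun result d =>
      (PySem.List.pyRange 0 (counts.getD d 0) 1).foldl (fun r _ => 10 * r + d) result) 0

-- ===== PRECONDITION & SPEC =====
def Spec_gen_perm (data : Int) (out : Int) : Prop := out = gen_perm_alt data
instance (data : Int) (out : Int) : Decidable (Spec_gen_perm data out) := by unfold Spec_gen_perm; infer_instance

-- ===== CLAIM (what is proved, stated in full; the proofs are below) =====
def Claim_equal_gen_perm : Prop := ∀ (data : Int), Dom_gen_perm data → Spec_gen_perm data (gen_perm data)

-- ===== LEMMAS AND PROOFS =====

-- every extracted digit lies in [0, 10)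
theorem digits_mem_bound (data : Int) : ∀ x ∈ genPermDigitsA data, 0 ≤ x ∧ x < 10 := by
  fun_induction genPermDigitsA data with
  | case1 => simp
  | case2 =>
      rename_i data h ih
      intro x hx
      rcases List.mem_cons.mp hx with rfl | hx
      · unfold PySem.Int.mod
        rw [Int.fmod_eq_emod]
        constructor <;> omega
      · exact ih x hx

-- the dict of counts is the digit-count function
theorem countsB_getD (data : Int) (c : PySem.Dict Int Int) (d : Int) :
    (genPermCountsB data c).getD d 0 = c.getD d 0 + ((genPermDigitsA data).count d : Int) := by
  fun_induction genPermCountsB data c with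
  | case1 =>
      rename_i c
      conv_rhs => rw [genPermDigitsA.eq_def]
      simp
  | case2 =>
      rename_i data c h ih
      conv_rhs => rw [genPermDigitsA.eq_def]
      rw [if_neg h, ih, PySem.Dict.getD_insert]
      by_cases hd : d = PySem.Int.mod data 10
      · subst hd
        rw [List.count_cons_self, if_pos rfl]
        push_cast
        ring
      · rw [if_neg hd, List.count_cons_of_ne (by exact fun e => hd e.symm)]

-- the descending-groups list B's two nested loops traverse
def pvGroups (xs : List Int) : List Int :=
  (PySem.List.pyRange 9 (-1) (-1)).flatMap (fun d => List.replicate (xs.count d) d)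

theorem count_groups (xs : List Int) :
    ∀ (l : List Int), l.Nodup → ∀ (a : Int),
      ((l.flatMap fun d => List.replicate (xs.count d) d).count a)
        = if a ∈ l then xs.count a else 0 := by
  intro l
  induction l with
  | nil => simp
  | cons d l ih =>
      intro hnd a
      rw [List.nodup_cons] at hnd
      rw [List.flatMap_cons, List.count_append, List.count_replicate, ih hnd.2 a]
      by_cases hd : a = d
      · subst hd
        simp [hnd.1]
      · have hba : (d == a) = false := by simpa using fun e : d = a => hd e.symm
        simp [hba, hd]

theorem groups_perm (xs : List Int) (hb : ∀ x ∈ xs, 0 ≤ x ∧ x < 10) :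
    (pvGroups xs).Perm xs := by
  rw [List.perm_iff_count]
  intro a
  rw [pvGroups, count_groups xs _ (by decide) a]
  by_cases ha : a ∈ xs
  · obtain ⟨h0, h1⟩ := hb a ha
    rw [if_pos (PySem.List.mem_pyRange_neg_one.mpr ⟨by omega, by omega⟩)]
  · rw [List.count_eq_zero.mpr ha]
    split_ifs <;> rfl

theorem groups_pairwise_aux (xs : List Int) :
    ∀ (l : List Int), l.Pairwise (fun a b => b < a) →
      (l.flatMap fun d => List.replicate (xs.count d) d).Pairwise (fun a b : Int => b ≤ a) := by
  intro l
  induction l with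
  | nil => simp
  | cons d l ih =>
      intro hp
      rw [List.pairwise_cons] at hp
      rw [List.flatMap_cons, List.pairwise_append]
      refine ⟨List.pairwise_replicate.mpr (Or.inr le_rfl), ih hp.2, ?_⟩
      intro a ha b hb
      rcases List.mem_flatMap.mp hb with ⟨d', hd', hbd'⟩
      rw [List.eq_of_mem_replicate ha, List.eq_of_mem_replicate hbd']
      exact le_of_lt (hp.1 d' hd')

theorem sorted_rev_eq_groups (xs : List Int) (hb : ∀ x ∈ xs, 0 ≤ x ∧ x < 10) :
    PySem.List.sorted xs (fun x => x) true = pvGroups xs := by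
  apply List.Perm.eq_of_pairwise (le := fun a b : Int => b ≤ a)
  · intro a b _ _ h1 h2; omega
  · exact PySem.List.sorted_pairwise_rev xs (fun x => x)
  · exact groups_pairwise_aux xs _ (by decide)
  · exact ((PySem.List.sorted_perm xs (fun x => x) true).trans (groups_perm xs hb).symm)

-- folding a constant step over any list depends only on its length
theorem foldl_const_len {α β γ : Type} (g : γ → γ) :
    ∀ (l1 : List α) (l2 : List β), l1.length = l2.length →
      ∀ i, l1.foldl (fun r _ => g r) i = l2.foldl (fun r _ => g r) i := by
  intro l1
  induction l1 with
  | nil =>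
      intro l2 h i
      rw [List.length_eq_zero_iff.mp h.symm]
      rfl
  | cons x t ih =>
      intro l2 h i
      cases l2 with
      | nil => simp at h
      | cons y t2 => simp only [List.foldl_cons]; exact ih t2 (by simpa using h) (g i)

-- ===== VERDICT (by name: the statement is the Claim_ definition above) =====
theorem gen_perm_spec : Claim_equal_gen_perm := by
  intro data _
  simp only [Spec_gen_perm, gen_perm, gen_perm_alt]
  have hc : ∀ d, (genPermCountsB data PySem.Dict.empty).getD d 0
      = ((genPermDigitsA data).count d : Int) := by
    intro d
    rw [countsB_getD]
    simp [PySem.Dict.empty, PySem.Dict.getD, PySem.Dict.get?]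
  rw [sorted_rev_eq_groups _ (digits_mem_bound data), pvGroups, List.foldl_flatMap]
  apply PySem.List.foldl_congr_mem
  intro acc d _
  rw [hc d]
  rw [PySem.List.foldl_congr_mem (List.replicate ((genPermDigitsA data).count d) d)
        (fun r n => 10 * r + n) (fun r _ => 10 * r + d) acc
        (fun a x hx => by rw [List.eq_of_mem_replicate hx])]
  apply foldl_const_len
  simp [PySem.List.pyRange_one, List.length_replicate]
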